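-- pv_equiv track=rewrite | github.com/szapf70/codecomp | faw/002_kvb_opendata/loesungen/fuss hopp lotz/funktionsbibliothek.py | HSTB_m_FT_AZ
-- ===== SOURCE A (Python) =====
-- def HSTB_m_FT_AZ(data):
--     '''Die Funktion durchsucht die Hauptdatei
--     nach den Haltestellenbereichen und zaehlt,
--     wie viele Bereiche Fahrtreppen, Aufzuege,
--     Beides oder keines von beidem haben.
--     Die Ausgabe ist ein Dictionary mit den
--     jeweiligen Schluesselwertpaaren.
--     Ausgabedatei:
--     {'HSTB_FT_AZ' : HSTB_FT_AZ,
--     'HSTB_FT' : HSTB_FT,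
--     'HSTB_AZ' : HSTB_AZ,
--     'HSTB_ohne_FT_AZ' : HSTB_ohne_FT_AZ}'''
--     HSTB_FT = 0
--     HSTB_AZ = 0
--     HSTB_FT_AZ = 0
--     HSTB_ohne_FT_AZ = 0
--     for key in data['HSTB']:
--         if data['HSTB'][key].get('Fahrtreppen') != None:
--             HSTB_FT += 1
--         if data['HSTB'][key].get('Aufzuege') != None:
--             HSTB_AZ += 1
--         if data['HSTB'][key].get('Fahrtreppen') != None and data['HSTB'][key].get('Aufzuege') != None:
--             HSTB_FT_AZ += 1
--         if data['HSTB'][key].get('Fahrtreppen') == None and data['HSTB'][key].get('Aufzuege') == None: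
--             HSTB_ohne_FT_AZ += 1
--     dic_m_FT_AZ = {'HSTB_FT_AZ' : HSTB_FT_AZ, 'HSTB_FT' : HSTB_FT, 'HSTB_AZ' : HSTB_AZ, 'HSTB_ohne_FT_AZ' : HSTB_ohne_FT_AZ}
--     return dic_m_FT_AZ
-- ===== SOURCE B (Python) =====
-- def HSTB_m_FT_AZ(data):
--     entries = list(data['HSTB'].values())
--     ft = sum(1 for e in entries if 'Fahrtreppen' in e)
--     az = sum(1 for e in entries if 'Aufzuege' in e)
--     both = sum(1 for e in entries if 'Fahrtreppen' in e and 'Aufzuege' in e)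
--     return {'HSTB_FT_AZ': both,
--             'HSTB_FT': ft,
--             'HSTB_AZ': az,
--             'HSTB_ohne_FT_AZ': len(entries) - ft - az + both}
-- ===== Notes on version B (the rewrite author's own statement) =====
-- stated objective: simpler
-- what changed: A runs one loop over the keys with repeated dict re-lookups maintaining four running tallies via four per-entry if-tests; B instead counts three predicates in separate staged passes over the values and derives the fourth ('neither') count arithmetically by inclusion-exclusion (n - ft - az + both) instead of counting it; Pre_ excludes inputs without an 'HSTB' key (A raises KeyError) and 'HSTB' association lists with duplicate keys, which cannot arise from a Python dict and on which key-iteration-with-re-lookup vs value iteration defensibly disagree.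
import Mathlib
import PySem

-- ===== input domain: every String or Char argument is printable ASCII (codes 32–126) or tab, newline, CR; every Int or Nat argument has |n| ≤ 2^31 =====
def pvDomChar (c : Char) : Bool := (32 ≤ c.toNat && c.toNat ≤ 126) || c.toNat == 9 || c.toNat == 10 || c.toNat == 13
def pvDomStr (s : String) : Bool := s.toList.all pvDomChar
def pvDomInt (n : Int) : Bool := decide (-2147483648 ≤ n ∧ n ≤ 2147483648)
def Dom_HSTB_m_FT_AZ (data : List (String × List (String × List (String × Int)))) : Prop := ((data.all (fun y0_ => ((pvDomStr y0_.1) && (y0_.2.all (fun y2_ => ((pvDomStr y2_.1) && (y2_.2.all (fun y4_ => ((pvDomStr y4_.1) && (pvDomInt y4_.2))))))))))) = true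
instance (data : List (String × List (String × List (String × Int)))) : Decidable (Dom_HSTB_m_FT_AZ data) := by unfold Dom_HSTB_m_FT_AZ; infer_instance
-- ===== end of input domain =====

-- B replaces A's single keyed loop with four running tallies by three staged counting
-- passes over the values plus an inclusion-exclusion formula (n - ft - az + both) for
-- the 'neither' count (objective: simpler, same O(n) cost).

-- ===== PORT A =====
-- A: four counters; for key in data['HSTB']: re-look the entry up and test four conditions.
def HSTB_m_FT_AZ (data : List (String × List (String × List (String × Int)))) : List (String × Int) :=
  match (PySem.Dict.mk data).get? "HSTB" with
  | none => []   -- Python raises KeyError here; excluded by Pre_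
  | some hstb =>
    let d := PySem.Dict.mk hstb
    let r := d.keys.foldl (fun (acc : Int × Int × Int × Int) key =>
      let e := PySem.Dict.mk ((d.get? key).getD [])   -- data['HSTB'][key] (key ∈ keys, so present)
      let ft := e.get? "Fahrtreppen"
      let az := e.get? "Aufzuege"
      let c1 := if ft ≠ none then acc.1 + 1 else acc.1
      let c2 := if az ≠ none then acc.2.1 + 1 else acc.2.1
      let c3 := if ft ≠ none ∧ az ≠ none then acc.2.2.1 + 1 else acc.2.2.1
      let c4 := if ft = none ∧ az = none then acc.2.2.2 + 1 else acc.2.2.2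
      (c1, c2, c3, c4)) (0, 0, 0, 0)
    [("HSTB_FT_AZ", r.2.2.1), ("HSTB_FT", r.1), ("HSTB_AZ", r.2.1), ("HSTB_ohne_FT_AZ", r.2.2.2)]

-- ===== PORT B =====
-- B: three staged counting passes over the values; 'neither' by inclusion-exclusion.
def HSTB_m_FT_AZ_alt (data : List (String × List (String × List (String × Int)))) : List (String × Int) :=
  match (PySem.Dict.mk data).get? "HSTB" with
  | none => []   -- Python raises KeyError here; excluded by Pre_
  | some hstb =>
    let entries := (PySem.Dict.mk hstb).values
    let ft := entries.foldl (fun acc e =>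
      if (PySem.Dict.mk e).contains "Fahrtreppen" then acc + 1 else acc) (0 : Int)
    let az := entries.foldl (fun acc e =>
      if (PySem.Dict.mk e).contains "Aufzuege" then acc + 1 else acc) (0 : Int)
    let both := entries.foldl (fun acc e =>
      if (PySem.Dict.mk e).contains "Fahrtreppen" && (PySem.Dict.mk e).contains "Aufzuege" then acc + 1 else acc) (0 : Int)
    [("HSTB_FT_AZ", both), ("HSTB_FT", ft), ("HSTB_AZ", az),
     ("HSTB_ohne_FT_AZ", (entries.length : Int) - ft - az + both)]

-- ===== PRECONDITION & SPEC =====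
-- Pre_ excludes inputs whose top-level dict lacks the key 'HSTB' (Python A raises KeyError there)
-- and association lists whose 'HSTB' value carries duplicate keys: duplicate keys cannot arise
-- from a Python dict, and on such lists iterating the keys with re-lookup (A) and iterating the
-- values (B) are equally defensible readings that disagree.
def Pre_HSTB_m_FT_AZ (data : List (String × List (String × List (String × Int)))) : Prop :=
  ((PySem.Dict.mk data).get? "HSTB").isSome = true ∧
  ((((PySem.Dict.mk data).get? "HSTB").getD []).map Prod.fst).Nodup
instance (data : List (String × List (String × List (String × Int)))) : Decidable (Pre_HSTB_m_FT_AZ data) := by unfold Pre_HSTB_m_FT_AZ; infer_instance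
def pvWitness_HSTB_m_FT_AZ : (List (String × List (String × List (String × Int)))) :=
  [("HSTB", [("Dom Hbf", [("Fahrtreppen", 4)]), ("Neumarkt", [])])]

def Spec_HSTB_m_FT_AZ (data : List (String × List (String × List (String × Int)))) (out : List (String × Int)) : Prop := out = HSTB_m_FT_AZ_alt data
instance (data : List (String × List (String × List (String × Int)))) (out : List (String × Int)) : Decidable (Spec_HSTB_m_FT_AZ data out) := by unfold Spec_HSTB_m_FT_AZ; infer_instance

-- ===== CLAIM (what is proved, stated in full; the proofs are below) =====
def Claim_equal_HSTB_m_FT_AZ : Prop := ∀ (data : List (String × List (String × List (String × Int)))), Dom_HSTB_m_FT_AZ data → Pre_HSTB_m_FT_AZ data → Spec_HSTB_m_FT_AZ data (HSTB_m_FT_AZ data)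

-- ===== LEMMAS AND PROOFS =====

-- presence predicates on one (key, entry) item
def pvFT (kv : String × List (String × Int)) : Bool :=
  ((PySem.Dict.mk kv.2).get? "Fahrtreppen").isSome
def pvAZ (kv : String × List (String × Int)) : Bool :=
  ((PySem.Dict.mk kv.2).get? "Aufzuege").isSome

-- A's four counters, characterized as countP of the presence predicates
theorem pv_A_fold (l : List (String × List (String × Int))) (a b c e : Int) :
  l.foldl (fun (acc : Int × Int × Int × Int) kv =>
      let ft := (PySem.Dict.mk kv.2).get? "Fahrtreppen"
      let az := (PySem.Dict.mk kv.2).get? "Aufzuege"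
      let c1 := if ft ≠ none then acc.1 + 1 else acc.1
      let c2 := if az ≠ none then acc.2.1 + 1 else acc.2.1
      let c3 := if ft ≠ none ∧ az ≠ none then acc.2.2.1 + 1 else acc.2.2.1
      let c4 := if ft = none ∧ az = none then acc.2.2.2 + 1 else acc.2.2.2
      (c1, c2, c3, c4)) (a, b, c, e)
  = (a + (l.countP pvFT : Int),
     b + (l.countP pvAZ : Int),
     c + (l.countP (fun kv => pvFT kv && pvAZ kv) : Int),
     e + (l.countP (fun kv => !pvFT kv && !pvAZ kv) : Int)) := by
  induction l generalizing a b c e with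
  | nil => simp
  | cons x xs ih =>
    simp only [List.foldl_cons, List.countP_cons, ih]
    have e1 : ((PySem.Dict.mk x.2).get? "Fahrtreppen" ≠ none) ↔ pvFT x = true := by
      rw [pvFT, Option.isSome_iff_ne_none]
    have e2 : ((PySem.Dict.mk x.2).get? "Aufzuege" ≠ none) ↔ pvAZ x = true := by
      rw [pvAZ, Option.isSome_iff_ne_none]
    have e1' : ((PySem.Dict.mk x.2).get? "Fahrtreppen" = none) ↔ pvFT x = false := by
      rw [← Bool.not_eq_true, ← e1]; simp
    have e2' : ((PySem.Dict.mk x.2).get? "Aufzuege" = none) ↔ pvAZ x = false := by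
      rw [← Bool.not_eq_true, ← e2]; simp
    cases h1 : pvFT x <;> cases h2 : pvAZ x <;>
      rw [h1] at e1 e1' <;> rw [h2] at e2 e2' <;>
      simp only [e1, e2, e1', e2'] <;>
      (simp [Prod.ext_iff]; try omega)

-- with unique keys, A's loop over keys with re-lookup is a loop over the items
theorem pv_keys_fold (hstb : List (String × List (String × Int)))
    (h : (hstb.map Prod.fst).Nodup)
    (F : (Int × Int × Int × Int) → (String × List (String × Int)) → (Int × Int × Int × Int))
    (init : Int × Int × Int × Int) :
    (PySem.Dict.mk hstb).keys.foldl
      (fun acc k => F acc (k, ((PySem.Dict.mk hstb).get? k).getD [])) init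
      = hstb.foldl F init := by
  set d := PySem.Dict.mk hstb with hd
  have hk : d.keys.Nodup := by simpa [hd, PySem.Dict.keys] using h
  have hit : d.items = d.keys.map (fun k => (k, d.getD k [])) :=
    PySem.Dict.items_eq_map_keys d hk []
  have : hstb.foldl F init = (d.keys.map (fun k => (k, d.getD k []))).foldl F init := by
    rw [← hit]
  simp only [PySem.Dict.getD_eq_get?_getD] at this
  rw [this, List.foldl_map]

-- inclusion-exclusion for countP over a list, in Int
theorem pv_incl_excl {α : Type} (l : List α) (p q : α → Bool) :
    (l.countP (fun x => !p x && !q x) : Int)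
      = (l.length : Int) - (l.countP p : Int) - (l.countP q : Int)
        + (l.countP (fun x => p x && q x) : Int) := by
  induction l with
  | nil => simp
  | cons x xs ih =>
    simp only [List.countP_cons, List.length_cons]
    cases h1 : p x <;> cases h2 : q x <;> simp <;> omega

-- the keys-with-relookup loop of A specialized to its body, as an items loop
theorem pv_keys_fold' (hstb : List (String × List (String × Int)))
    (h : (hstb.map Prod.fst).Nodup) :
    (PySem.Dict.mk hstb).keys.foldl (fun (acc : Int × Int × Int × Int) key =>
      let e := PySem.Dict.mk (((PySem.Dict.mk hstb).get? key).getD [])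
      let ft := e.get? "Fahrtreppen"
      let az := e.get? "Aufzuege"
      let c1 := if ft ≠ none then acc.1 + 1 else acc.1
      let c2 := if az ≠ none then acc.2.1 + 1 else acc.2.1
      let c3 := if ft ≠ none ∧ az ≠ none then acc.2.2.1 + 1 else acc.2.2.1
      let c4 := if ft = none ∧ az = none then acc.2.2.2 + 1 else acc.2.2.2
      (c1, c2, c3, c4)) (0, 0, 0, 0)
    = hstb.foldl (fun (acc : Int × Int × Int × Int) kv =>
      let ft := (PySem.Dict.mk kv.2).get? "Fahrtreppen"
      let az := (PySem.Dict.mk kv.2).get? "Aufzuege"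
      let c1 := if ft ≠ none then acc.1 + 1 else acc.1
      let c2 := if az ≠ none then acc.2.1 + 1 else acc.2.1
      let c3 := if ft ≠ none ∧ az ≠ none then acc.2.2.1 + 1 else acc.2.2.1
      let c4 := if ft = none ∧ az = none then acc.2.2.2 + 1 else acc.2.2.2
      (c1, c2, c3, c4)) (0, 0, 0, 0) :=
  pv_keys_fold hstb h (fun (acc : Int × Int × Int × Int) kv =>
      let ft := (PySem.Dict.mk kv.2).get? "Fahrtreppen"
      let az := (PySem.Dict.mk kv.2).get? "Aufzuege"
      let c1 := if ft ≠ none then acc.1 + 1 else acc.1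
      let c2 := if az ≠ none then acc.2.1 + 1 else acc.2.1
      let c3 := if ft ≠ none ∧ az ≠ none then acc.2.2.1 + 1 else acc.2.2.1
      let c4 := if ft = none ∧ az = none then acc.2.2.2 + 1 else acc.2.2.2
      (c1, c2, c3, c4)) (0, 0, 0, 0)

-- ===== VERDICT (by name: the statement is the Claim_ definition above) =====
theorem HSTB_m_FT_AZ_spec : Claim_equal_HSTB_m_FT_AZ := by
  intro data _ hPre
  obtain ⟨h1, h2⟩ := hPre
  obtain ⟨hstb, hs⟩ := Option.isSome_iff_exists.mp h1
  rw [hs] at h2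
  simp only [Option.getD_some] at h2
  unfold Spec_HSTB_m_FT_AZ HSTB_m_FT_AZ HSTB_m_FT_AZ_alt
  rw [hs]
  dsimp only
  rw [pv_keys_fold' hstb h2, pv_A_fold hstb 0 0 0 0]
  rw [PySem.List.foldl_if_add_one, PySem.List.foldl_if_add_one, PySem.List.foldl_if_add_one]
  have hv : (PySem.Dict.mk hstb).values = hstb.map Prod.snd := rfl
  rw [hv]
  simp only [List.countP_map, List.length_map, Function.comp_def,
    PySem.Dict.contains_eq_isSome_get?]
  have hft : (fun kv : String × List (String × Int) =>
      ((PySem.Dict.mk kv.2).get? "Fahrtreppen").isSome) = pvFT := rfl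
  have haz : (fun kv : String × List (String × Int) =>
      ((PySem.Dict.mk kv.2).get? "Aufzuege").isSome) = pvAZ := rfl
  have hboth : (fun kv : String × List (String × Int) =>
      ((PySem.Dict.mk kv.2).get? "Fahrtreppen").isSome
        && ((PySem.Dict.mk kv.2).get? "Aufzuege").isSome)
      = (fun kv => pvFT kv && pvAZ kv) := rfl
  rw [hft, haz, hboth, pv_incl_excl hstb pvFT pvAZ]
  simp
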